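-- pv_equiv track=rewrite | github.com/SGenheden/advent_of_code | aoc_2017/solutions2017/day12/utils.py | find_clique
-- ===== SOURCE A (Python) =====
-- def find_clique(root, graph, visited):
--     programs = {root}
--     if graph[root] and root not in visited:
--         visited[root] = None
--         for child in graph[root]:
--             programs.update(find_clique(child, graph, visited))
--         return programs
--     return programs
-- ===== SOURCE B (Python) =====
-- def find_clique(root, graph, visited):
--     programs = set()
--     stack = [root]
--     while stack:
--         node, stack = stack[0], stack[1:]
--         val = graph[node]
--         programs.add(node)
--         if val and node not in visited:
--             visited[node] = None
--             stack = list(val) + stack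
--     return programs
-- ===== Notes on version B (the rewrite author's own statement) =====
-- stated objective: alternative
-- what changed: A's recursive DFS (per-node recursion whose results are unioned into the set) is rewritten as an iterative while loop over an explicit work stack that prepends children, building the same set and the same visited marks without recursion.
import Mathlib
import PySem

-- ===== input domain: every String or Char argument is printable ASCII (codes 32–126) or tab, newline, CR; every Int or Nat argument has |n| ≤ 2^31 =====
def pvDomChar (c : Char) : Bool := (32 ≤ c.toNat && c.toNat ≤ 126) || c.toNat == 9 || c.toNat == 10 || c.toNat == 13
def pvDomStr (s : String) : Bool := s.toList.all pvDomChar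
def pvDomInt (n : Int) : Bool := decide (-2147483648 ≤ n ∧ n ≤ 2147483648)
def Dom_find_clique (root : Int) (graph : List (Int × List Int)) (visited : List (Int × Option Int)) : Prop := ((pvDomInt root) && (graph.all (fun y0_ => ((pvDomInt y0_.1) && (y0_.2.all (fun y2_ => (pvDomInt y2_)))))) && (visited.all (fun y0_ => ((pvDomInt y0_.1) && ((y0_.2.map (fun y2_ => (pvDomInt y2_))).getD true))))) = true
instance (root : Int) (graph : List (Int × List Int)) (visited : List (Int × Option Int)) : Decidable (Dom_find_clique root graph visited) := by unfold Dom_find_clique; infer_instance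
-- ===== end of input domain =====

-- B rewrites A's recursive DFS as an iterative loop over an explicit work stack (children prepended);
-- equivalence is about the RETURN value only (both Pythons also mark the same nodes in `visited` in the same order).

-- ===== PORT A =====
-- fuel bound for A's recursion: number of graph keys not yet visited, plus one (a totality guard only)
def muA (g : PySem.Dict Int (List Int)) (v : PySem.Dict Int (Option Int)) : Nat :=
  ((PySem.Dict.keys g).filter (fun k => !(PySem.Dict.contains v k))).length

mutual
-- literal port of A's body; `none` = KeyError or fuel exhausted (fuel is a guard, Pre_ rules out KeyError)
def goA (fuel : Nat) (root : Int) (g : PySem.Dict Int (List Int)) (v : PySem.Dict Int (Option Int)) :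
    Option (List Int × PySem.Dict Int (Option Int)) :=
  match fuel with
  | 0 => none
  | f + 1 =>
    match PySem.Dict.get? g root with          -- graph[root]  (none = KeyError)
    | none => none
    | some val =>
      if val ≠ [] ∧ PySem.Dict.contains v root = false then   -- if graph[root] and root not in visited
        runA f val (PySem.Set.ofList [root]) g (PySem.Dict.insert v root none)  -- visited[root] = None; loop
      else some (PySem.Set.ofList [root], v)   -- programs = {root}
  termination_by (fuel, 0)
-- the `for child in graph[root]: programs.update(find_clique(child, graph, visited))` loop
def runA (fuel : Nat) (cs : List Int) (progs : List Int) (g : PySem.Dict Int (List Int))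
    (v : PySem.Dict Int (Option Int)) : Option (List Int × PySem.Dict Int (Option Int)) :=
  match cs with
  | [] => some (progs, v)
  | c :: cs' =>
    match goA fuel c g v with
    | none => none
    | some (p2, v2) => runA fuel cs' (PySem.Set.update progs p2) g v2
  termination_by (fuel, cs.length + 1)
end

def find_clique (root : Int) (graph : List (Int × List Int)) (visited : List (Int × Option Int)) : List Int :=
  ((goA (muA (PySem.Dict.mk graph) (PySem.Dict.mk visited) + 1) root (PySem.Dict.mk graph)
      (PySem.Dict.mk visited)).map Prod.fst).getD []

-- ===== PORT B =====
-- termination measure for B's while loop: stack size plus the total weight of unvisited graph entries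
def wB (g : PySem.Dict Int (List Int)) (v : PySem.Dict Int (Option Int)) : Nat :=
  (((PySem.Dict.keys g).filter (fun k => !(PySem.Dict.contains v k))).map
    (fun k => (PySem.Dict.getD g k []).length + 1)).sum

theorem pv_sum_filter_mono (f : Int → Nat) (p q : Int → Bool) (h : ∀ a, p a = true → q a = true) :
    ∀ l : List Int, ((l.filter p).map f).sum ≤ ((l.filter q).map f).sum := by
  intro l
  induction l with
  | nil => simp
  | cons a l ih =>
    by_cases hp : p a = true
    · simp [hp, h a hp]; omega
    · simp only [List.filter_cons]
      rw [Bool.not_eq_true] at hp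
      rw [hp]
      cases hq : q a <;> simp [List.sum_cons] <;> omega

theorem pv_S_insert (g : PySem.Dict Int (List Int)) (v : PySem.Dict Int (Option Int)) (node : Int)
    (val : List Int) (hval : PySem.Dict.getD g node [] = val)
    (hv : PySem.Dict.contains v node = false) :
    ∀ l : List Int, node ∈ l →
      ((l.filter (fun k => !(PySem.Dict.contains (PySem.Dict.insert v node none) k))).map
          (fun k => (PySem.Dict.getD g k []).length + 1)).sum + (val.length + 1) ≤
        ((l.filter (fun k => !(PySem.Dict.contains v k))).map
          (fun k => (PySem.Dict.getD g k []).length + 1)).sum := by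
  have himp : ∀ k, (!(PySem.Dict.contains (PySem.Dict.insert v node none) k)) = true →
      (!(PySem.Dict.contains v k)) = true := by
    intro k hk
    simp only [PySem.Dict.contains_insert, Bool.not_eq_true', Bool.or_eq_false_iff] at hk
    simp [hk.2]
  intro l
  induction l with
  | nil => intro h; cases h
  | cons a l ih =>
    intro hmem
    by_cases ha : a = node
    · subst ha
      have h1 : (!(PySem.Dict.contains (PySem.Dict.insert v a none) a)) = false := by
        simp
      have h2 : (!(PySem.Dict.contains v a)) = true := by simp [hv]
      have hmono := pv_sum_filter_mono (fun k => (PySem.Dict.getD g k []).length + 1)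
        (fun k => !(PySem.Dict.contains (PySem.Dict.insert v a none) k))
        (fun k => !(PySem.Dict.contains v k)) himp l
      rw [List.filter_cons, List.filter_cons, h1, h2]
      simp only [Bool.false_eq_true, if_true, if_false, List.map_cons,
        List.sum_cons, hval]
      omega
    · have hb : PySem.Dict.contains (PySem.Dict.insert v node none) a = PySem.Dict.contains v a := by
        rw [PySem.Dict.contains_insert, beq_false_of_ne ha, Bool.false_or]
      have hmem' : node ∈ l := by
        rcases List.mem_cons.mp hmem with h | h
        · exact absurd h.symm ha
        · exact h
      have ih' := ih hmem'
      rw [List.filter_cons, List.filter_cons, hb]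
      cases hca : PySem.Dict.contains v a
      · simp only [Bool.not_false, if_true, List.map, List.sum_cons]
        omega
      · simp only [Bool.not_true, Bool.false_eq_true, if_false]
        exact ih'

theorem pv_wB_insert (g : PySem.Dict Int (List Int)) (v : PySem.Dict Int (Option Int)) (node : Int)
    (val : List Int) (hg : PySem.Dict.get? g node = some val)
    (hv : PySem.Dict.contains v node = false) :
    wB g (PySem.Dict.insert v node none) + (val.length + 1) ≤ wB g v := by
  have hmem : node ∈ PySem.Dict.keys g := by
    by_contra hc
    rw [← PySem.Dict.get?_eq_none_iff_not_mem_keys] at hc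
    simp [hc] at hg
  have hval : PySem.Dict.getD g node [] = val := by
    rw [PySem.Dict.getD_eq_get?_getD, hg]; rfl
  exact pv_S_insert g v node val hval hv (PySem.Dict.keys g) hmem

-- literal port of B's while loop (Source B); recursion is on the measure above, `none` = KeyError
def goB (g : PySem.Dict Int (List Int)) (progs : List Int) (stack : List Int)
    (v : PySem.Dict Int (Option Int)) : Option (List Int × PySem.Dict Int (Option Int)) :=
  match stack with
  | [] => some (progs, v)                       -- while stack: … ; return programs
  | node :: rest =>                             -- node, stack = stack[0], stack[1:]
    match hg : PySem.Dict.get? g node with      -- val = graph[node]  (none = KeyError)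
    | none => none
    | some val =>
      if hc : val ≠ [] ∧ PySem.Dict.contains v node = false then  -- if val and node not in visited
        goB g (PySem.Set.add progs node) (val ++ rest) (PySem.Dict.insert v node none)
      else
        goB g (PySem.Set.add progs node) rest v
termination_by stack.length + wB g v
decreasing_by
  · have := pv_wB_insert g v node val hg hc.2
    simp only [List.length_append, List.length_cons]
    omega
  · simp only [List.length_cons]
    omega

def find_clique_alt (root : Int) (graph : List (Int × List Int)) (visited : List (Int × Option Int)) : List Int :=
  ((goB (PySem.Dict.mk graph) PySem.Set.empty [root] (PySem.Dict.mk visited)).map Prod.fst).getD []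

-- ===== PRECONDITION & SPEC =====
-- the nodes whose graph[...] A evaluates: the closure of {root} under children of "expandable"
-- nodes (graph keys with a truthy adjacency list, not initially visited), computed by iterating
-- one monotone closure step often enough to reach its fixpoint
def pvExpandable (g : PySem.Dict Int (List Int)) (v0 : PySem.Dict Int (Option Int)) (n : Int) : Bool :=
  PySem.Dict.contains g n && decide (PySem.Dict.getD g n [] ≠ []) && !(PySem.Dict.contains v0 n)

def pvStep (g : PySem.Dict Int (List Int)) (v0 : PySem.Dict Int (Option Int)) (T : List Int) : List Int :=
  PySem.Set.update T ((T.filter (pvExpandable g v0)).flatMap (fun n => PySem.Dict.getD g n []))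

def pvTouched (root : Int) (g : PySem.Dict Int (List Int)) (v0 : PySem.Dict Int (Option Int)) : List Int :=
  (pvStep g v0)^[(PySem.List.dedup (PySem.Dict.keys g)).length + 1] (PySem.Set.ofList [root])

-- Pre_ excludes exactly the inputs on which A raises KeyError: A evaluates graph[n] precisely for
-- the nodes n reachable from root through expandable nodes, so A returns iff all of them are keys.
def Pre_find_clique (root : Int) (graph : List (Int × List Int)) (visited : List (Int × Option Int)) : Prop :=
  (pvTouched root (PySem.Dict.mk graph) (PySem.Dict.mk visited)).all
    (fun n => PySem.Dict.contains (PySem.Dict.mk graph) n) = true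
instance (root : Int) (graph : List (Int × List Int)) (visited : List (Int × Option Int)) : Decidable (Pre_find_clique root graph visited) := by unfold Pre_find_clique; infer_instance

def pvWitness_find_clique : Int × (List (Int × List Int)) × (List (Int × Option Int)) :=
  (0, [(0, [1, 2]), (1, [2]), (2, [])], [])

def Spec_find_clique (root : Int) (graph : List (Int × List Int)) (visited : List (Int × Option Int)) (out : List Int) : Prop := out = find_clique_alt root graph visited
instance (root : Int) (graph : List (Int × List Int)) (visited : List (Int × Option Int)) (out : List Int) : Decidable (Spec_find_clique root graph visited out) := by unfold Spec_find_clique; infer_instance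

-- ===== CLAIM (what is proved, stated in full; the proofs are below) =====
def Claim_equal_find_clique : Prop := ∀ (root : Int) (graph : List (Int × List Int)) (visited : List (Int × Option Int)), Dom_find_clique root graph visited → Pre_find_clique root graph visited → Spec_find_clique root graph visited (find_clique root graph visited)

-- ===== LEMMAS AND PROOFS =====

theorem pv_filter_len_mono (p q : Int → Bool) (h : ∀ a, p a = true → q a = true) :
    ∀ l : List Int, (l.filter p).length ≤ (l.filter q).length := by
  intro l
  induction l with
  | nil => simp
  | cons a l ih =>
    rw [List.filter_cons, List.filter_cons]
    cases hp : p a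
    · cases hq : q a <;> simp <;> omega
    · rw [h a hp]
      simpa using ih

theorem pv_filter_len_lt (p q : Int → Bool) (h : ∀ a, p a = true → q a = true) (x : Int) :
    ∀ l : List Int, x ∈ l → q x = true → p x = false →
      (l.filter p).length < (l.filter q).length := by
  intro l
  induction l with
  | nil => intro h'; cases h'
  | cons a l ih =>
    intro hmem hq hp
    rw [List.filter_cons, List.filter_cons]
    rcases List.mem_cons.mp hmem with rfl | hmem'
    · rw [hp, hq]
      simpa using Nat.lt_succ_of_le (pv_filter_len_mono p q h l)
    · have := ih hmem' hq hp
      cases hpa : p a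
      · cases hqa : q a <;> simp <;> omega
      · rw [h a hpa]
        simpa using this

theorem pv_mu_mono (g : PySem.Dict Int (List Int)) (v v2 : PySem.Dict Int (Option Int))
    (h : ∀ k, PySem.Dict.contains v k = true → PySem.Dict.contains v2 k = true) :
    muA g v2 ≤ muA g v := by
  unfold muA
  apply pv_filter_len_mono
  intro a ha
  simp only [Bool.not_eq_true'] at ha ⊢
  by_contra hc
  rw [Bool.not_eq_false] at hc
  rw [h a hc] at ha
  cases ha

theorem pv_mu_insert (g : PySem.Dict Int (List Int)) (v : PySem.Dict Int (Option Int)) (root : Int)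
    (hmem : root ∈ PySem.Dict.keys g) (hv : PySem.Dict.contains v root = false) :
    muA g (PySem.Dict.insert v root none) < muA g v := by
  unfold muA
  apply pv_filter_len_lt _ _ _ root _ hmem
  · simp [hv]
  · simp
  · intro a ha
    simp only [PySem.Dict.contains_insert, Bool.not_eq_true', Bool.or_eq_false_iff] at ha
    simp [ha.2]

theorem pv_add_of_mem (s : List Int) (e : Int) (h : e ∈ s) : PySem.Set.add s e = s := by
  simp [PySem.Set.add, PySem.Set.contains, h]

theorem pv_update_add (x y : List Int) (e : Int) :
    PySem.Set.update x (PySem.Set.add y e) = PySem.Set.add (PySem.Set.update x y) e := by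
  by_cases h : e ∈ y
  · rw [pv_add_of_mem y e h, pv_add_of_mem]
    rw [PySem.Set.mem_update]
    exact Or.inr h
  · have : PySem.Set.add y e = y ++ [e] := by
      simp [PySem.Set.add, PySem.Set.contains, h]
    rw [this]
    show List.foldl PySem.Set.add x (y ++ [e]) = _
    rw [List.foldl_append]
    rfl

theorem pv_update_update (x : List Int) (z : List Int) : ∀ y : List Int,
    PySem.Set.update x (PySem.Set.update y z) = PySem.Set.update (PySem.Set.update x y) z := by
  induction z with
  | nil => intro y; rfl
  | cons e z ih =>
    intro y
    show PySem.Set.update x (PySem.Set.update (PySem.Set.add y e) z) = _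
    rw [ih (PySem.Set.add y e)]
    rw [pv_update_add]
    rfl

-- unfolding equations for the recursive ports
theorem pv_goA_zero (root : Int) (g : PySem.Dict Int (List Int)) (v : PySem.Dict Int (Option Int)) :
    goA 0 root g v = none := by rw [goA]

theorem pv_goA_succ_none (f : Nat) (root : Int) (g : PySem.Dict Int (List Int))
    (v : PySem.Dict Int (Option Int)) (hg : PySem.Dict.get? g root = none) :
    goA (f + 1) root g v = none := by rw [goA, hg]

theorem pv_goA_succ_some (f : Nat) (root : Int) (g : PySem.Dict Int (List Int))
    (v : PySem.Dict Int (Option Int)) (val : List Int) (hg : PySem.Dict.get? g root = some val) :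
    goA (f + 1) root g v =
      if val ≠ [] ∧ PySem.Dict.contains v root = false then
        runA f val (PySem.Set.ofList [root]) g (PySem.Dict.insert v root none)
      else some (PySem.Set.ofList [root], v) := by rw [goA, hg]

theorem pv_runA_nil (f : Nat) (p : List Int) (g : PySem.Dict Int (List Int))
    (v : PySem.Dict Int (Option Int)) : runA f [] p g v = some (p, v) := by rw [runA]

theorem pv_runA_cons_none (f : Nat) (c : Int) (cs p : List Int) (g : PySem.Dict Int (List Int))
    (v : PySem.Dict Int (Option Int)) (hgo : goA f c g v = none) :
    runA f (c :: cs) p g v = none := by rw [runA, hgo]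

theorem pv_runA_cons_some (f : Nat) (c : Int) (cs p : List Int) (g : PySem.Dict Int (List Int))
    (v : PySem.Dict Int (Option Int)) (p2 : List Int) (v2 : PySem.Dict Int (Option Int))
    (hgo : goA f c g v = some (p2, v2)) :
    runA f (c :: cs) p g v = runA f cs (PySem.Set.update p p2) g v2 := by rw [runA, hgo]

theorem pv_goB_nil (g : PySem.Dict Int (List Int)) (p : List Int)
    (v : PySem.Dict Int (Option Int)) : goB g p [] v = some (p, v) := by rw [goB]

theorem pv_goB_cons_some (g : PySem.Dict Int (List Int)) (p : List Int) (node : Int)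
    (rest : List Int) (v : PySem.Dict Int (Option Int)) (val : List Int)
    (hg : PySem.Dict.get? g node = some val) :
    goB g p (node :: rest) v =
      if val ≠ [] ∧ PySem.Dict.contains v node = false then
        goB g (PySem.Set.add p node) (val ++ rest) (PySem.Dict.insert v node none)
      else goB g (PySem.Set.add p node) rest v := by
  rw [goB]
  split
  · next heq => rw [hg] at heq; cases heq
  · next val' heq =>
    rw [hg] at heq
    cases heq
    rw [dite_eq_ite]

-- visited only grows through A's recursion
theorem pv_growth :
    ∀ fuel : Nat,
      (∀ root g v p2 v2, goA fuel root g v = some (p2, v2) →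
        ∀ k, PySem.Dict.contains v k = true → PySem.Dict.contains v2 k = true) ∧
      (∀ cs progs g v p2 v2, runA fuel cs progs g v = some (p2, v2) →
        ∀ k, PySem.Dict.contains v k = true → PySem.Dict.contains v2 k = true) := by
  intro fuel
  induction fuel with
  | zero =>
    constructor
    · intro root g v p2 v2 h
      rw [pv_goA_zero] at h
      cases h
    · intro cs progs g v p2 v2 h k hk
      cases cs with
      | nil =>
        rw [pv_runA_nil] at h
        cases h
        exact hk
      | cons c cs' =>
        rw [pv_runA_cons_none 0 c cs' progs g v (pv_goA_zero c g v)] at h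
        cases h
  | succ f ih =>
    have hA : ∀ root g v p2 v2, goA (f + 1) root g v = some (p2, v2) →
        ∀ k, PySem.Dict.contains v k = true → PySem.Dict.contains v2 k = true := by
      intro root g v p2 v2 h k hk
      cases hg : PySem.Dict.get? g root with
      | none => rw [pv_goA_succ_none f root g v hg] at h; cases h
      | some val =>
        rw [pv_goA_succ_some f root g v val hg] at h
        by_cases hc : val ≠ [] ∧ PySem.Dict.contains v root = false
        · rw [if_pos hc] at h
          refine ih.2 val _ g _ p2 v2 h k ?_
          rw [PySem.Dict.contains_insert, hk, Bool.or_true]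
        · rw [if_neg hc] at h
          cases h
          exact hk
    refine ⟨hA, ?_⟩
    intro cs
    induction cs with
    | nil =>
      intro progs g v p2 v2 h k hk
      rw [pv_runA_nil] at h
      cases h
      exact hk
    | cons c cs' ihc =>
      intro progs g v p2 v2 h k hk
      cases hg : goA (f + 1) c g v with
      | none => rw [pv_runA_cons_none _ _ _ _ _ _ hg] at h; cases h
      | some r =>
        obtain ⟨rp, rv⟩ := r
        rw [pv_runA_cons_some _ _ _ _ _ _ rp rv hg] at h
        exact ihc _ g _ p2 v2 h k (hA c g v rp rv hg k hk)

-- A's result set is duplicate-free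
theorem pv_nodup :
    ∀ fuel : Nat,
      (∀ root g v p2 v2, goA fuel root g v = some (p2, v2) → p2.Nodup) ∧
      (∀ cs progs g v p2 v2, progs.Nodup → runA fuel cs progs g v = some (p2, v2) → p2.Nodup) := by
  intro fuel
  induction fuel with
  | zero =>
    constructor
    · intro root g v p2 v2 h
      rw [pv_goA_zero] at h
      cases h
    · intro cs progs g v p2 v2 hnd h
      cases cs with
      | nil =>
        rw [pv_runA_nil] at h
        cases h
        exact hnd
      | cons c cs' =>
        rw [pv_runA_cons_none 0 c cs' progs g v (pv_goA_zero c g v)] at h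
        cases h
  | succ f ih =>
    have hA : ∀ root g v p2 v2, goA (f + 1) root g v = some (p2, v2) → p2.Nodup := by
      intro root g v p2 v2 h
      cases hg : PySem.Dict.get? g root with
      | none => rw [pv_goA_succ_none f root g v hg] at h; cases h
      | some val =>
        rw [pv_goA_succ_some f root g v val hg] at h
        by_cases hc : val ≠ [] ∧ PySem.Dict.contains v root = false
        · rw [if_pos hc] at h
          exact ih.2 val _ g _ p2 v2 (PySem.Set.nodup_ofList [root]) h
        · rw [if_neg hc] at h
          cases h
          exact PySem.Set.nodup_ofList [root]
    refine ⟨hA, ?_⟩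
    intro cs
    induction cs with
    | nil =>
      intro progs g v p2 v2 hnd h
      rw [pv_runA_nil] at h
      cases h
      exact hnd
    | cons c cs' ihc =>
      intro progs g v p2 v2 hnd h
      cases hg : goA (f + 1) c g v with
      | none => rw [pv_runA_cons_none _ _ _ _ _ _ hg] at h; cases h
      | some r =>
        obtain ⟨rp, rv⟩ := r
        rw [pv_runA_cons_some _ _ _ _ _ _ rp rv hg] at h
        exact ihc _ g _ p2 v2 (PySem.Set.nodup_update progs rp hnd) h

-- membership characterisation of one closure step
theorem pv_mem_step (g : PySem.Dict Int (List Int)) (v0 : PySem.Dict Int (Option Int))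
    (T : List Int) (x : Int) :
    x ∈ pvStep g v0 T ↔
      x ∈ T ∨ ∃ m ∈ T, pvExpandable g v0 m = true ∧ x ∈ PySem.Dict.getD g m [] := by
  unfold pvStep
  rw [PySem.Set.mem_update, List.mem_flatMap]
  constructor
  · rintro (h | ⟨m, hm, hx⟩)
    · exact Or.inl h
    · rw [List.mem_filter] at hm
      exact Or.inr ⟨m, hm.1, hm.2, hx⟩
  · rintro (h | ⟨m, hmT, hexp, hx⟩)
    · exact Or.inl h
    · exact Or.inr ⟨m, List.mem_filter.mpr ⟨hmT, hexp⟩, hx⟩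

theorem pv_step_subset (g : PySem.Dict Int (List Int)) (v0 : PySem.Dict Int (Option Int))
    (T : List Int) (x : Int) (h : x ∈ T) : x ∈ pvStep g v0 T :=
  (pv_mem_step g v0 T x).mpr (Or.inl h)

theorem pv_step_congr (g : PySem.Dict Int (List Int)) (v0 : PySem.Dict Int (Option Int))
    (T T' : List Int) (h : ∀ x, x ∈ T ↔ x ∈ T') (x : Int) :
    x ∈ pvStep g v0 T ↔ x ∈ pvStep g v0 T' := by
  rw [pv_mem_step, pv_mem_step]
  constructor
  · rintro (hx | ⟨m, hm, he, hc⟩)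
    · exact Or.inl ((h x).mp hx)
    · exact Or.inr ⟨m, (h m).mp hm, he, hc⟩
  · rintro (hx | ⟨m, hm, he, hc⟩)
    · exact Or.inl ((h x).mpr hx)
    · exact Or.inr ⟨m, (h m).mpr hm, he, hc⟩

-- the iterates of the closure step, relative to a fixed start
theorem pv_iter_subset (g : PySem.Dict Int (List Int)) (v0 : PySem.Dict Int (Option Int))
    (s : List Int) (i : Nat) (x : Int) (h : x ∈ (pvStep g v0)^[i] s) :
    x ∈ (pvStep g v0)^[i + 1] s := by
  rw [Function.iterate_succ_apply']
  exact pv_step_subset g v0 _ x h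

theorem pv_iter_le (g : PySem.Dict Int (List Int)) (v0 : PySem.Dict Int (Option Int))
    (s : List Int) (i j : Nat) (hij : i ≤ j) (x : Int) (h : x ∈ (pvStep g v0)^[i] s) :
    x ∈ (pvStep g v0)^[j] s := by
  induction j with
  | zero => cases Nat.le_zero.mp hij; exact h
  | succ j ih =>
    rcases Nat.lt_or_ge i (j + 1) with hlt | hge
    · exact pv_iter_subset g v0 s j x (ih (by omega))
    · cases Nat.le_antisymm hij hge; exact h

-- once the expandable members stop changing, the iterates are stable (as sets)
theorem pv_stab_step (g : PySem.Dict Int (List Int)) (v0 : PySem.Dict Int (Option Int))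
    (s : List Int) (i : Nat)
    (h : ∀ n, pvExpandable g v0 n = true →
      (n ∈ (pvStep g v0)^[i] s ↔ n ∈ (pvStep g v0)^[i + 1] s)) :
    ∀ x, x ∈ (pvStep g v0)^[i + 2] s ↔ x ∈ (pvStep g v0)^[i + 1] s := by
  intro x
  constructor
  · intro hx
    rw [Function.iterate_succ_apply' (n := i + 1), pv_mem_step] at hx
    rcases hx with hx | ⟨m, hm, he, hc⟩
    · exact hx
    · have hmi : m ∈ (pvStep g v0)^[i] s := (h m he).mpr hm
      rw [Function.iterate_succ_apply' (n := i), pv_mem_step]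
      exact Or.inr ⟨m, hmi, he, hc⟩
  · exact pv_iter_subset g v0 s (i + 1) x

theorem pv_stab_all (g : PySem.Dict Int (List Int)) (v0 : PySem.Dict Int (Option Int))
    (s : List Int) (i : Nat)
    (hstab : ∀ x, x ∈ (pvStep g v0)^[i + 1] s ↔ x ∈ (pvStep g v0)^[i] s) :
    ∀ j, i ≤ j → ∀ x, x ∈ (pvStep g v0)^[j + 1] s ↔ x ∈ (pvStep g v0)^[j] s := by
  intro j hij
  induction j with
  | zero => cases Nat.le_zero.mp hij; exact hstab
  | succ j ih =>
    rcases Nat.lt_or_ge i (j + 1) with hlt | hge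
    · have hprev := ih (by omega)
      intro x
      have h2 : (pvStep g v0)^[j + 1] s = pvStep g v0 ((pvStep g v0)^[j] s) :=
        Function.iterate_succ_apply' _ _ _
      have hprev' : ∀ y, y ∈ pvStep g v0 ((pvStep g v0)^[j] s) ↔ y ∈ (pvStep g v0)^[j] s :=
        fun y => h2 ▸ hprev y
      rw [Function.iterate_succ_apply' (n := j + 1), h2]
      exact pv_step_congr g v0 _ _ hprev' x
    · cases Nat.le_antisymm hij hge; exact hstab

-- pigeonhole: within |dedup keys| + 1 steps some iterate has stable expandable members
theorem pv_find_stab (g : PySem.Dict Int (List Int)) (v0 : PySem.Dict Int (Option Int))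
    (s : List Int) :
    ∃ i ≤ (PySem.List.dedup (PySem.Dict.keys g)).length,
      ∀ n, pvExpandable g v0 n = true →
        (n ∈ (pvStep g v0)^[i] s ↔ n ∈ (pvStep g v0)^[i + 1] s) := by
  set K := (PySem.List.dedup (PySem.Dict.keys g)).length with hK
  by_contra hcon
  push_neg at hcon
  -- each failing step strictly increases the count of expandable dedup-keys inside the iterate
  have hgrow : ∀ i ≤ K,
      ((PySem.List.dedup (PySem.Dict.keys g)).filter
        (fun n => pvExpandable g v0 n && decide (n ∈ (pvStep g v0)^[i] s))).length <
      ((PySem.List.dedup (PySem.Dict.keys g)).filter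
        (fun n => pvExpandable g v0 n && decide (n ∈ (pvStep g v0)^[i + 1] s))).length := by
    intro i hi
    obtain ⟨n, hexp, hne⟩ := hcon i hi
    have hsub : n ∈ (pvStep g v0)^[i] s → n ∈ (pvStep g v0)^[i + 1] s :=
      pv_iter_subset g v0 s i n
    have hn1 : n ∈ (pvStep g v0)^[i + 1] s := by tauto
    have hn0 : n ∉ (pvStep g v0)^[i] s := by tauto
    have hkey : n ∈ PySem.List.dedup (PySem.Dict.keys g) := by
      have : PySem.Dict.contains g n = true := by
        unfold pvExpandable at hexp
        simp only [Bool.and_eq_true] at hexp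
        exact hexp.1.1
      rw [PySem.List.mem_dedup]
      exact (PySem.Dict.contains_iff_mem_keys g n).mp this
    have himp : ∀ a, (pvExpandable g v0 a && decide (a ∈ (pvStep g v0)^[i] s)) = true →
        (pvExpandable g v0 a && decide (a ∈ (pvStep g v0)^[i + 1] s)) = true := by
      intro a ha
      simp only [Bool.and_eq_true, decide_eq_true_eq] at ha ⊢
      exact ⟨ha.1, pv_iter_subset g v0 s i a ha.2⟩
    exact pv_filter_len_lt _ _ himp n _ hkey
      (by simp only [Bool.and_eq_true, decide_eq_true_eq]; exact ⟨hexp, hn1⟩)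
      (by rw [hexp, Bool.true_and]; exact decide_eq_false hn0)
  -- so after K + 1 steps the count exceeds the list length: contradiction
  have hcnt : ∀ i ≤ K + 1,
      i ≤ ((PySem.List.dedup (PySem.Dict.keys g)).filter
        (fun n => pvExpandable g v0 n && decide (n ∈ (pvStep g v0)^[i] s))).length := by
    intro i
    induction i with
    | zero => intro _; exact Nat.zero_le _
    | succ i ih =>
      intro hi
      have h1 := ih (by omega)
      have h2 := hgrow i (by omega)
      omega
  have hfin := hcnt (K + 1) (le_refl _)
  have hle : ((PySem.List.dedup (PySem.Dict.keys g)).filter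
      (fun n => pvExpandable g v0 n && decide (n ∈ (pvStep g v0)^[K + 1] s))).length ≤ K := by
    rw [hK]
    exact List.length_filter_le _ _
  omega

-- pvTouched is closed: children of its expandable members stay inside it
theorem pv_touched_closed (root : Int) (g : PySem.Dict Int (List Int))
    (v0 : PySem.Dict Int (Option Int)) :
    ∀ m ∈ pvTouched root g v0, pvExpandable g v0 m = true →
      ∀ c ∈ PySem.Dict.getD g m [], c ∈ pvTouched root g v0 := by
  intro m hm hexp c hc
  obtain ⟨i, hi, hstab0⟩ := pv_find_stab g v0 (PySem.Set.ofList [root])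
  have hst2 := pv_stab_step g v0 (PySem.Set.ofList [root]) i hstab0
  have hall := pv_stab_all g v0 (PySem.Set.ofList [root]) (i + 1) hst2
  set K := (PySem.List.dedup (PySem.Dict.keys g)).length with hK
  have hNs := hall (K + 1) (by omega)
  unfold pvTouched at hm ⊢
  have hcN : c ∈ (pvStep g v0)^[K + 1 + 1] (PySem.Set.ofList [root]) := by
    rw [Function.iterate_succ_apply' (n := K + 1)]
    exact (pv_mem_step g v0 _ c).mpr (Or.inr ⟨m, hm, hexp, hc⟩)
  exact (hNs c).mp hcN

-- root is in pvTouched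
theorem pv_touched_root (root : Int) (g : PySem.Dict Int (List Int))
    (v0 : PySem.Dict Int (Option Int)) : root ∈ pvTouched root g v0 := by
  unfold pvTouched
  apply pv_iter_le g v0 _ 0 _ (Nat.zero_le _)
  simp [PySem.Set.ofList]

-- under Pre_'s closure set, enough fuel makes A's recursion return
theorem pv_total (g : PySem.Dict Int (List Int)) (v0 : PySem.Dict Int (Option Int)) (T : List Int)
    (hkeys : ∀ m ∈ T, PySem.Dict.contains g m = true)
    (hclosed : ∀ m ∈ T, pvExpandable g v0 m = true → ∀ c ∈ PySem.Dict.getD g m [], c ∈ T) :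
    ∀ n : Nat,
      (∀ v root, root ∈ T → (∀ k, PySem.Dict.contains v0 k = true → PySem.Dict.contains v k = true) →
        muA g v ≤ n → (goA (n + 1) root g v).isSome) ∧
      (∀ cs progs v, (∀ c ∈ cs, c ∈ T) →
        (∀ k, PySem.Dict.contains v0 k = true → PySem.Dict.contains v k = true) →
        muA g v < n → (runA n cs progs g v).isSome) := by
  intro n
  induction n using Nat.strong_induction_on with
  | _ n ihn =>
    have hR : ∀ cs progs v, (∀ c ∈ cs, c ∈ T) →
        (∀ k, PySem.Dict.contains v0 k = true → PySem.Dict.contains v k = true) →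
        muA g v < n → (runA n cs progs g v).isSome := by
      intro cs
      induction cs with
      | nil =>
        intro progs v _ _ _
        rw [pv_runA_nil]
        rfl
      | cons c cs' ihc =>
        intro progs v hcs hext hlt
        obtain ⟨m, rfl⟩ : ∃ m, n = m + 1 := ⟨n - 1, by omega⟩
        have hgo := (ihn m (by omega)).1 v c (hcs c List.mem_cons_self) hext (by omega)
        cases hg : goA (m + 1) c g v with
        | none => rw [hg] at hgo; cases hgo
        | some r =>
          obtain ⟨rp, rv⟩ := r
          rw [pv_runA_cons_some _ _ _ _ _ _ rp rv hg]
          have hgrow := (pv_growth (m + 1)).1 c g v rp rv hg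
          refine ihc _ rv (fun x hx => hcs x (List.mem_cons_of_mem _ hx))
            (fun k hk => hgrow k (hext k hk)) ?_
          have := pv_mu_mono g v rv hgrow
          omega
    refine ⟨?_, hR⟩
    intro v root hroot hext hle
    have hcg : PySem.Dict.contains g root = true := hkeys root hroot
    cases hg : PySem.Dict.get? g root with
    | none =>
      rw [PySem.Dict.get?_eq_none_iff_not_mem_keys] at hg
      rw [PySem.Dict.contains_iff_mem_keys] at hcg
      exact absurd hcg hg
    | some val =>
      rw [pv_goA_succ_some n root g v val hg]
      by_cases hc : val ≠ [] ∧ PySem.Dict.contains v root = false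
      · rw [if_pos hc]
        have hv0 : PySem.Dict.contains v0 root = false := by
          cases h0 : PySem.Dict.contains v0 root
          · rfl
          · rw [hext root h0] at hc; exact absurd hc.2 (by simp)
        have hgetD : PySem.Dict.getD g root [] = val := by
          rw [PySem.Dict.getD_eq_get?_getD, hg]; rfl
        have hexp : pvExpandable g v0 root = true := by
          unfold pvExpandable
          rw [hcg, hgetD, hv0]
          simp [hc.1]
        refine hR val _ _ ?_ ?_ ?_
        · intro c hcm
          exact hclosed root hroot hexp c (hgetD ▸ hcm)
        · intro k hk
          rw [PySem.Dict.contains_insert, hext k hk, Bool.or_true]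
        · have hmem : root ∈ PySem.Dict.keys g := (PySem.Dict.contains_iff_mem_keys g root).mp hcg
          have := pv_mu_insert g v root hmem hc.2
          omega
      · rw [if_neg hc]
        rfl

-- the bridge: one recursive call of A corresponds to pushing the node on B's stack
theorem pv_bridge :
    ∀ fA root g v p2 v2 p rest R,
      goA fA root g v = some (p2, v2) →
      goB g (PySem.Set.update p p2) rest v2 = some R →
      goB g p (root :: rest) v = some R := by
  intro fA
  induction fA using Nat.strong_induction_on with
  | _ fA ihf =>
    intro root g v p2 v2 p rest R hA hB
    match fA, hA with
    | 0, hA => rw [pv_goA_zero] at hA; cases hA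
    | f + 1, hA =>
    cases hg : PySem.Dict.get? g root with
    | none => rw [pv_goA_succ_none f root g v hg] at hA; cases hA
    | some val =>
      rw [pv_goA_succ_some f root g v val hg] at hA
      by_cases hc : val ≠ [] ∧ PySem.Dict.contains v root = false
      · rw [if_pos hc] at hA
        -- sub-bridge for the children loop
        have hrun : ∀ cs q v p2 v2 p rest R,
            runA f cs q g v = some (p2, v2) →
            goB g (PySem.Set.update p p2) rest v2 = some R →
            goB g (PySem.Set.update p q) (cs ++ rest) v = some R := by
          intro cs
          induction cs with
          | nil =>
            intro q v p2 v2 p rest R hr hb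
            rw [pv_runA_nil] at hr
            cases hr
            exact hb
          | cons c cs' ihc =>
            intro q v p2 v2 p rest R hr hb
            cases hgo : goA f c g v with
            | none => rw [pv_runA_cons_none _ _ _ _ _ _ hgo] at hr; cases hr
            | some r =>
              obtain ⟨rp, rv⟩ := r
              rw [pv_runA_cons_some _ _ _ _ _ _ rp rv hgo] at hr
              have step := ihc _ rv p2 v2 p rest R hr hb
              rw [pv_update_update] at step
              exact ihf f (by omega) c g v rp rv (PySem.Set.update p q) (cs' ++ rest) R hgo step
        have := hrun val (PySem.Set.ofList [root]) _ p2 v2 p rest R hA hB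
        rw [pv_goB_cons_some g p root rest v val hg, if_pos hc]
        exact this
      · rw [if_neg hc] at hA
        cases hA
        rw [pv_goB_cons_some g p root rest v val hg, if_neg hc]
        exact hB

-- ===== VERDICT (by name: the statement is the Claim_ definition above) =====
theorem find_clique_spec : Claim_equal_find_clique := by
  intro root graph visited _ hpre
  unfold Spec_find_clique find_clique find_clique_alt
  unfold Pre_find_clique at hpre
  rw [List.all_eq_true] at hpre
  set g := PySem.Dict.mk graph with hgdef
  set v := PySem.Dict.mk visited with hvdef
  have htot := (pv_total g v (pvTouched root g v)
    (fun m hm => by simpa using hpre m hm)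
    (pv_touched_closed root g v) (muA g v)).1 v root (pv_touched_root root g v)
    (fun k hk => hk) (le_refl _)
  cases hA : goA (muA g v + 1) root g v with
  | none => rw [hA] at htot; cases htot
  | some r =>
    obtain ⟨rp, rv⟩ := r
    have hnd := (pv_nodup (muA g v + 1)).1 root g v rp rv hA
    have hB0 : goB g (PySem.Set.update PySem.Set.empty rp) [] rv =
        some (PySem.Set.update PySem.Set.empty rp, rv) := pv_goB_nil g _ rv
    have hbr := pv_bridge (muA g v + 1) root g v rp rv PySem.Set.empty [] _ hA hB0
    have hupd : PySem.Set.update PySem.Set.empty rp = rp := by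
      show PySem.Set.update [] rp = rp
      rw [PySem.Set.update_nil_left, PySem.Set.ofList_eq_self_of_nodup rp hnd]
    rw [hbr, hupd]
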